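-- pv_equiv track=rewrite | github.com/TheBirdBlue/PyTestProj | func_modules/levelup.py | maxStatRecursion
-- ===== SOURCE A (Python) =====
-- def maxStatRecursion(level, experience, experienceDown, stat):
--     if experience >= int(stat * 1.5) and level <= 999:
--
--         # Increment Level, Attack, and queue Exp used
--         experienceDown -= int(stat * 1.5)
--         level += 1
--         stat += 1
--
--         # Decrement old values before checking again
--         experience += int(experienceDown)
--         recursionReturn = maxStatRecursion(level, experience, 0, stat)
--         return recursionReturn
--
--     else:
--         return level, experience, experienceDown, stat
-- ===== SOURCE B (Python) =====
-- def maxStatRecursion(level, experience, experienceDown, stat):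
--     # Iterative re-implementation: early return when no level-up happens; otherwise
--     # count levels gained in `gained` and track leftover experience in `pool`.
--     if experience < int(stat * 1.5) or level > 999:
--         return level, experience, experienceDown, stat
--     pool = experience + experienceDown - int(stat * 1.5)
--     gained = 1
--     while level + gained <= 999 and pool >= int((stat + gained) * 1.5):
--         pool -= int((stat + gained) * 1.5)
--         gained += 1
--     return level + gained, pool, 0, stat + gained
-- ===== Notes on version B (the rewrite author's own statement) =====
-- stated objective: idiomatic
-- what changed: Replaces A's tail recursion (which overflows CPython's recursion stack on deep inputs) by a while loop over a (pool, gained) accumulator with an early return for the no-level-up case; the final tuple is derived from the counters instead of threaded through recursive calls.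
import Mathlib
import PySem

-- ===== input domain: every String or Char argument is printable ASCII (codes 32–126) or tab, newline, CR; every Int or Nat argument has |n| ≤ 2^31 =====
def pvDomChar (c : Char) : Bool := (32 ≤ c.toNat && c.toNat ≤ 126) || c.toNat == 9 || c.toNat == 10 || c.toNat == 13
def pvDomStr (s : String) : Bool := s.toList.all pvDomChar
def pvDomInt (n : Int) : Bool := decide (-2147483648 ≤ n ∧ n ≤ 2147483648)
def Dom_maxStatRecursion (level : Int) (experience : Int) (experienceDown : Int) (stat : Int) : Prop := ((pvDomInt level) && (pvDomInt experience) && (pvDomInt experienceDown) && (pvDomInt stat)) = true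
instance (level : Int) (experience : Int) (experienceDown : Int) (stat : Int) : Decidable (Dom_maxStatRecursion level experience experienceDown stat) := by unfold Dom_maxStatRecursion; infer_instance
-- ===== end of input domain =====

-- B replaces A's tail recursion by a while loop over a (pool, gained) accumulator (idiomatic; no
-- CPython stack growth); return values proved equal on Pre_, which excludes only the inputs that
-- drive A's recursion deeper than 9000 frames (at the runner's recursion limit of 10000 A raises
-- RecursionError a little beyond that).

-- ===== PORT A =====
-- int(stat * 1.5) : for |stat| ≤ 2^31 the float product 3*stat/2 is exact (3*|stat| < 2^53) and
-- int() truncates toward zero, which is Int.tdiv (3*stat) 2; exact on Dom.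
def maxStatRecursion (level : Int) (experience : Int) (experienceDown : Int) (stat : Int) : Int × Int × Int × Int :=
  if experience ≥ (3 * stat).tdiv 2 ∧ level ≤ 999 then
    -- experienceDown -= int(stat*1.5); level += 1; stat += 1; experience += int(experienceDown)
    maxStatRecursion (level + 1) (experience + (experienceDown - (3 * stat).tdiv 2)) 0 (stat + 1)
  else
    (level, experience, experienceDown, stat)
termination_by (1000 - level).toNat
decreasing_by omega

-- ===== PORT B =====
-- the while loop of Source B: state (pool, gained), level and stat fixed
def altLoop (level : Int) (stat : Int) (pool : Int) (gained : Int) : Int × Int :=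
  if level + gained ≤ 999 ∧ pool ≥ (3 * (stat + gained)).tdiv 2 then
    altLoop level stat (pool - (3 * (stat + gained)).tdiv 2) (gained + 1)
  else
    (pool, gained)
termination_by (1000 - (level + gained)).toNat
decreasing_by omega

def maxStatRecursion_alt (level : Int) (experience : Int) (experienceDown : Int) (stat : Int) : Int × Int × Int × Int :=
  if experience < (3 * stat).tdiv 2 ∨ level > 999 then
    (level, experience, experienceDown, stat)
  else
    let r := altLoop level stat (experience + experienceDown - (3 * stat).tdiv 2) 1
    (level + r.2, r.1, 0, stat + r.2)

-- ===== PRECONDITION & SPEC =====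
-- pvSumCost stat j = Σ_{i<j} int((stat+i)*1.5), the total experience consumed by j level-ups
-- (a plain arithmetic sum over the inputs, used only to state where A's recursion stays shallow)
def pvSumCost (stat : Int) (j : Nat) : Int := ∑ i ∈ Finset.range j, (3 * (stat + (i : Int))).tdiv 2

-- Pre_ excludes exactly the inputs that make A perform more than 9000 recursive calls: there A
-- raises RecursionError under the runner's recursion limit of 10000, except for a thin band of
-- depths between 9001 and roughly the limit, kept outside as a safety margin for the caller's own
-- stack use, on which A still returns (see the cited example).  It admits: every input with no
-- level-up at all, every input with level ≥ -8000 (depth is then capped at 1000 - level ≤ 9000),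
-- and every low-level input whose experience pool is exhausted within 9000 level-ups.
def Pre_maxStatRecursion (level : Int) (experience : Int) (experienceDown : Int) (stat : Int) : Prop :=
  experience < (3 * stat).tdiv 2 ∨ level > 999 ∨ -8000 ≤ level ∨
    experience + experienceDown < max (pvSumCost stat 2) (pvSumCost stat 9001)
instance (level : Int) (experience : Int) (experienceDown : Int) (stat : Int) : Decidable (Pre_maxStatRecursion level experience experienceDown stat) := by unfold Pre_maxStatRecursion; infer_instance

def pvWitness_maxStatRecursion : Int × Int × Int × Int := (1, 20, 0, 3)

def Spec_maxStatRecursion (level : Int) (experience : Int) (experienceDown : Int) (stat : Int) (out : Int × Int × Int × Int) : Prop := out = maxStatRecursion_alt level experience experienceDown stat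
instance (level : Int) (experience : Int) (experienceDown : Int) (stat : Int) (out : Int × Int × Int × Int) : Decidable (Spec_maxStatRecursion level experience experienceDown stat out) := by unfold Spec_maxStatRecursion; infer_instance

-- ===== CLAIM (what is proved, stated in full; the proofs are below) =====
def Claim_equal_maxStatRecursion : Prop := ∀ (level : Int) (experience : Int) (experienceDown : Int) (stat : Int), Dom_maxStatRecursion level experience experienceDown stat → Pre_maxStatRecursion level experience experienceDown stat → Spec_maxStatRecursion level experience experienceDown stat (maxStatRecursion level experience experienceDown stat)


-- ===== LEMMAS AND PROOFS =====

-- After the first level-up A's remaining recursion (with experienceDown = 0) computes exactly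
-- what B's loop accumulates.
theorem loop_eq (level stat : Int) : ∀ pool gained : Int,
    maxStatRecursion (level + gained) pool 0 (stat + gained) =
      (level + (altLoop level stat pool gained).2, (altLoop level stat pool gained).1, 0,
        stat + (altLoop level stat pool gained).2) := by
  intro pool gained
  induction pool, gained using altLoop.induct level stat with
  | case1 pool gained h ih =>
    rw [altLoop, if_pos h, maxStatRecursion, if_pos ⟨h.2, h.1⟩]
    have e1 : level + gained + 1 = level + (gained + 1) := by ring
    have e2 : stat + gained + 1 = stat + (gained + 1) := by ring
    have e3 : pool + (0 - (3 * (stat + gained)).tdiv 2) = pool - (3 * (stat + gained)).tdiv 2 := by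
      ring
    rw [e1, e2, e3, ih]
  | case2 pool gained h =>
    rw [altLoop, if_neg h, maxStatRecursion]
    rw [if_neg (by tauto)]

-- ===== VERDICT (by name: the statement is the Claim_ definition above) =====
theorem maxStatRecursion_spec : Claim_equal_maxStatRecursion := by
  intro level experience experienceDown stat _ _
  unfold Spec_maxStatRecursion maxStatRecursion_alt
  by_cases h : experience < (3 * stat).tdiv 2 ∨ level > 999
  · rw [if_pos h, maxStatRecursion, if_neg (by omega)]
  · rw [if_neg h]
    push Not at h
    rw [maxStatRecursion, if_pos ⟨h.1, by omega⟩]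
    have e3 : experience + (experienceDown - (3 * stat).tdiv 2) =
        experience + experienceDown - (3 * stat).tdiv 2 := by ring
    rw [e3, loop_eq level stat]
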